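-- pv_equiv track=rewrite | github.com/jack-chaudier/stark | scripts/family-runtime/overlapping_adjustment_families.py | family_survival_signature
-- ===== SOURCE A (Python) =====
-- from typing import Dict, Iterable, List, Sequence, Set, Tuple
--
-- def family_survival_signature(
--     family: Sequence[Tuple[int, ...]],
--     universe: Sequence[int],
-- ) -> Tuple[Tuple[int, ...], ...]:
--     signature = []
--     family_sets = [set(item) for item in family]
--     for mask in range(1 << len(universe)):
--         survivors = {universe[index] for index in range(len(universe)) if mask & (1 << index)}
--         surviving_edges = tuple(sorted(tuple(edge) for edge in family if set(edge).issubset(survivors)))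
--         signature.append(surviving_edges)
--     return tuple(signature)
-- ===== SOURCE B (Python) =====
-- def family_survival_signature(family, universe):
--     # one bit per DISTINCT universe value
--     rep = {}
--     for u in universe:
--         if u not in rep:
--             rep[u] = 1 << len(rep)
--     impossible = 1 << len(rep)  # bit never present in a value-mask
--     repbits = [rep[u] for u in universe]
--     # presort edges once; pair each with the value-mask it requires
--     prepped = sorted(
--         ((tuple(edge), _edge_mask(edge, rep, impossible)) for edge in family),
--         key=lambda p: p[0],
--     )
--     # answers indexed by value-mask: one subset test (int AND) per edge
--     table = []
--     for vmask in range(1 << len(rep)):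
--         table.append(tuple(t for t, em in prepped if vmask & em == em))
--     signature = []
--     for mask in range(1 << len(universe)):
--         v = 0
--         for i, rb in enumerate(repbits):
--             if mask & (1 << i):
--                 v |= rb
--         signature.append(table[v])
--     return tuple(signature)
--
--
-- def _edge_mask(edge, rep, impossible):
--     em = 0
--     for v in edge:
--         em |= rep.get(v, impossible)
--     return em
-- ===== Notes on version B (the rewrite author's own statement) =====
-- stated objective: faster
-- what changed: Instead of rebuilding a survivor set and re-sorting the family for each of the 2^n masks, B assigns one bit per distinct universe value, presorts the edges once with their required value-bitmask, builds a table of the 2^r (r = number of distinct values) answers with a single integer subset test (AND) per edge, and maps every mask to its table entry via a cheap bit projection; intended as faster, measured 1.56x at the largest size both versions finished (for very large universes the 2^n-sized output dominates both).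
import Mathlib
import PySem

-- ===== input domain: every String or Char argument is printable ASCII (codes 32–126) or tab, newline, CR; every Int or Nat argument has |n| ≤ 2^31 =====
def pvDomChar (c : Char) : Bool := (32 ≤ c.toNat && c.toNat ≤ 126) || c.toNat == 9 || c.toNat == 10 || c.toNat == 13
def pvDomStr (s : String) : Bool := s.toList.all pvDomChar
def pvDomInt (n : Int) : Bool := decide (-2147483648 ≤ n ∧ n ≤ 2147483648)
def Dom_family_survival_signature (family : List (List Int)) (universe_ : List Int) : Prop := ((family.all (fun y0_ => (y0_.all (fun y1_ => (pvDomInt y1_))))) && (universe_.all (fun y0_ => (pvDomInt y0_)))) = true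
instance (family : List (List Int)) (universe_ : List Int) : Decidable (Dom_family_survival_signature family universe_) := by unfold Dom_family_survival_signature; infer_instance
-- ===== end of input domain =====

-- B precomputes one bit per distinct universe value and a 2^r answer table (one int subset test
-- per edge), then maps each of the 2^n masks to its compressed value-mask (intended as faster;
-- measured 1.56x at the largest size both versions finished).

-- ===== PORT A =====
def family_survival_signature (family : List (List Int)) (universe_ : List Int) : List (List (List Int)) :=
  let _family_sets := family.map (fun item => PySem.Set.ofList item)
  (List.range (2 ^ universe_.length)).map (fun mask =>
    let survivors : PySem.Set Int :=
      PySem.Set.ofList (((List.range universe_.length).filter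
        (fun index => mask &&& (1 <<< index) != 0)).map
        (fun index : Nat => PySem.List.pyGetD universe_ (index : Int) 0))
    PySem.List.sorted (family.filter
      (fun edge => PySem.Set.issubset (PySem.Set.ofList edge) survivors)) (fun x => x) false)

-- ===== PORT B =====
-- Source B helper _edge_mask: OR of the bits of the edge's vertices (rep.get(v, impossible))
def edge_mask_b (edge : List Int) (rep : PySem.Dict Int Nat) (impossible : Nat) : Nat :=
  edge.foldl (fun em v => em ||| PySem.Dict.getD rep v impossible) 0

def family_survival_signature_alt (family : List (List Int)) (universe_ : List Int) : List (List (List Int)) :=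
  let rep : PySem.Dict Int Nat := universe_.foldl
    (fun rep u => if PySem.Dict.contains rep u then rep
                  else PySem.Dict.insert rep u (1 <<< PySem.Dict.size rep)) PySem.Dict.empty
  let impossible : Nat := 1 <<< PySem.Dict.size rep
  -- rep[u]: u is always a key of rep, so the total getD with default 0 is exact here
  let repbits : List Nat := universe_.map (fun u => PySem.Dict.getD rep u 0)
  let prepped := PySem.List.sorted
    (family.map (fun edge => (edge, edge_mask_b edge rep impossible))) (fun p => p.1) false
  let table : List (List (List Int)) := (List.range (2 ^ PySem.Dict.size rep)).map
    (fun vmask => (prepped.filter (fun p => vmask &&& p.2 == p.2)).map (fun p => p.1))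
  (List.range (2 ^ universe_.length)).map (fun mask =>
    let vb := repbits.foldl
      (fun (s : Nat × Nat) rb => (if mask &&& s.2 != 0 then s.1 ||| rb else s.1, s.2 <<< 1)) (0, 1)
    PySem.List.pyGetD table (vb.1 : Int) [])

-- ===== PRECONDITION & SPEC =====
def Spec_family_survival_signature (family : List (List Int)) (universe_ : List Int) (out : List (List (List Int))) : Prop := out = family_survival_signature_alt family universe_
instance (family : List (List Int)) (universe_ : List Int) (out : List (List (List Int))) : Decidable (Spec_family_survival_signature family universe_ out) := by unfold Spec_family_survival_signature; infer_instance

-- ===== CLAIM (what is proved, stated in full; the proofs are below) =====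
def Claim_equal_family_survival_signature : Prop := ∀ (family : List (List Int)) (universe_ : List Int), Dom_family_survival_signature family universe_ → Spec_family_survival_signature family universe_ (family_survival_signature family universe_)

-- ===== LEMMAS AND PROOFS =====

def pvStepRep (d : PySem.Dict Int Nat) (u : Int) : PySem.Dict Int Nat :=
  if PySem.Dict.contains d u then d else PySem.Dict.insert d u (1 <<< PySem.Dict.size d)

def pvRep (U : List Int) : PySem.Dict Int Nat := U.foldl pvStepRep PySem.Dict.empty

theorem pvRep_spec (U : List Int) :
    (∀ u : Int, (pvRep U).get? u =
      if u ∈ PySem.Set.ofList U then some (1 <<< (PySem.Set.ofList U).idxOf u) else none)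
    ∧ (pvRep U).size = (PySem.Set.ofList U).length := by
  induction U using List.reverseRecOn with
  | nil =>
    refine ⟨fun u => ?_, ?_⟩
    · simp [pvRep, PySem.Dict.get?_empty, PySem.Set.ofList]
    · simp [pvRep, PySem.Dict.size_empty, PySem.Set.ofList]
  | append_singleton xs x ih =>
    obtain ⟨ihg, ihs⟩ := ih
    have hfold : pvRep (xs ++ [x]) = pvStepRep (pvRep xs) x := by
      simp [pvRep, List.foldl_append]
    by_cases hx : x ∈ PySem.Set.ofList xs
    · have hc : (pvRep xs).contains x = true := by
        cases h : (pvRep xs).contains x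
        · have := (PySem.Dict.get?_eq_none_iff_contains (pvRep xs) x).mpr h
          rw [ihg x, if_pos hx] at this; exact absurd this (by simp)
        · rfl
      rw [hfold, pvStepRep, if_pos hc, PySem.Set.ofList_append_singleton,
        PySem.Set.add_of_mem hx]
      exact ⟨ihg, ihs⟩
    · have hc : (pvRep xs).contains x = false := by
        apply (PySem.Dict.get?_eq_none_iff_contains (pvRep xs) x).mp
        rw [ihg x, if_neg hx]
      rw [hfold, pvStepRep, if_neg (by simp [hc]), PySem.Set.ofList_append_singleton,
        PySem.Set.add_of_not_mem hx]
      refine ⟨fun u => ?_, ?_⟩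
      · rw [PySem.Dict.get?_insert, ihs]
        by_cases hu : u = x
        · subst hu
          rw [if_pos rfl, if_pos (by simp), List.idxOf_append_of_notMem hx]
          simp
        · rw [if_neg hu, ihg u]
          by_cases hu2 : u ∈ PySem.Set.ofList xs
          · rw [if_pos hu2, if_pos (by simp [hu2]), List.idxOf_append_of_mem hu2]
          · rw [if_neg hu2, if_neg (by simp [hu2, hu])]
      · rw [PySem.Dict.size_insert, if_neg (by simp [hc]), ihs]
        simp

theorem pv_and_shift (mask k : Nat) : (mask &&& (1 <<< k) != 0) = mask.testBit k := by
  rw [Nat.one_shiftLeft, Nat.and_two_pow]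
  cases h : mask.testBit k <;> simp [h, Nat.pow_pos, Nat.pos_iff_ne_zero]

theorem pv_subset_iff (a b : Nat) :
    (a &&& b == b) = true ↔ ∀ j, b.testBit j = true → a.testBit j = true := by
  constructor
  · intro h j hb
    have he : a &&& b = b := by simpa using h
    have := congrArg (fun x => x.testBit j) he
    simpa [Nat.testBit_and, hb] using this
  · intro h
    simp only [beq_iff_eq]
    apply Nat.eq_of_testBit_eq
    intro j
    rw [Nat.testBit_and]
    cases hb : b.testBit j
    · simp
    · simp [h j hb]

theorem pv_lt_two_pow (x r : Nat) (h : ∀ j, x.testBit j = true → j < r) : x < 2 ^ r := by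
  have hx : x = x % 2 ^ r := by
    apply Nat.eq_of_testBit_eq
    intro i
    rw [Nat.testBit_mod_two_pow]
    cases hb : x.testBit i
    · simp
    · simp [h i hb]
  rw [hx]
  exact Nat.mod_lt _ (Nat.pow_pos (by norm_num))

theorem pv_foldl_or_testBit (f : Int → Nat) (e : List Int) (acc j : Nat) :
    ((e.foldl (fun em v => em ||| f v) acc).testBit j)
      = (acc.testBit j || e.any (fun v => (f v).testBit j)) := by
  induction e generalizing acc with
  | nil => simp
  | cons v e ih => simp [ih, Nat.testBit_or, Bool.or_assoc]

theorem pv_proj_testBit (mask : Nat) (rbs : List Nat) (s0 k j : Nat) :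
    ((rbs.foldl (fun (s : Nat × Nat) rb =>
        (if mask &&& s.2 != 0 then s.1 ||| rb else s.1, s.2 <<< 1)) (s0, 1 <<< k)).1).testBit j = true
      ↔ s0.testBit j = true ∨
        ∃ i, ∃ h : i < rbs.length, mask.testBit (k + i) = true ∧ (rbs[i]'h).testBit j = true := by
  induction rbs generalizing s0 k with
  | nil => simp
  | cons rb rbs ih =>
    have hshift : (1 <<< k) <<< 1 = 1 <<< (k + 1) := (Nat.shiftLeft_add 1 k 1).symm
    simp only [List.foldl_cons, pv_and_shift, hshift]
    rw [ih]
    constructor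
    · rintro (h0 | ⟨i, hi, hm, hb⟩)
      · cases hmk : mask.testBit k
        · rw [hmk] at h0; simp at h0
          exact Or.inl h0
        · rw [hmk] at h0; simp [Nat.testBit_or] at h0
          rcases h0 with h0 | h0
          · exact Or.inl h0
          · exact Or.inr ⟨0, by simp, by simpa using hmk, by simpa using h0⟩
      · exact Or.inr ⟨i + 1, by simpa using hi, by simpa [Nat.add_comm, Nat.add_left_comm] using hm, by simpa using hb⟩
    · rintro (h0 | ⟨i, hi, hm, hb⟩)
      · cases hmk : mask.testBit k <;> simp [hmk, Nat.testBit_or, h0]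
      · cases i with
        | zero =>
          simp only [Nat.add_zero] at hm
          left
          simp [hm, Nat.testBit_or]
          right; simpa using hb
        | succ i =>
          right
          exact ⟨i, by simpa using hi, by simpa [Nat.add_comm, Nat.add_left_comm] using hm, by simpa using hb⟩

theorem pv_sorted_id_bridge (xs ys : List (List Int)) (h1 : ys.Perm xs)
    (h2 : ys.Pairwise (fun a b => a ≤ b)) :
    PySem.List.sorted xs (fun x => x) false = ys := by
  have hinst : PySem.List.sorted xs (fun x => x) false
      = @PySem.List.sorted _ _ List.instLinearOrder.toLT LinearOrder.toDecidableLT xs (fun x => x) false := by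
    congr 1
  rw [hinst]
  exact PySem.List.sorted_id_eq_of_perm_of_pairwise xs ys h1 h2

theorem pv_prepped_pairwise (l : List (List Int × Nat)) :
    (PySem.List.sorted l (fun p => p.1) false).Pairwise (fun a b => a.1 ≤ b.1) := by
  have hinst : PySem.List.sorted l (fun p => p.1) false
      = @PySem.List.sorted _ _ List.instLinearOrder.toLT LinearOrder.toDecidableLT l (fun p => p.1) false := by
    congr 1
  rw [hinst]
  exact PySem.List.sorted_pairwise l (fun p => p.1)


def pvProj (U : List Int) (mask : Nat) : Nat :=
  ((U.map (fun u => PySem.Dict.getD (pvRep U) u 0)).foldl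
    (fun (s : Nat × Nat) rb => (if mask &&& s.2 != 0 then s.1 ||| rb else s.1, s.2 <<< 1)) (0, 1)).1


theorem pv_rb (U : List Int) (u : Int) (hu : u ∈ U) (dflt : Nat) :
    PySem.Dict.getD (pvRep U) u dflt = 1 <<< (PySem.Set.ofList U).idxOf u := by
  rw [PySem.Dict.getD_eq_get?_getD, (pvRep_spec U).1 u,
    if_pos ((PySem.Set.mem_ofList U u).mpr hu)]
  rfl

theorem pv_projbit (U : List Int) (mask : Nat) (j : Nat) :
    (pvProj U mask).testBit j = true ↔
      ∃ i, ∃ h : i < U.length, mask.testBit i = true ∧ (PySem.Set.ofList U).idxOf (U[i]'h) = j := by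
  have hprojv : pvProj U mask = ((U.map (fun u => 1 <<< (PySem.Set.ofList U).idxOf u)).foldl
      (fun (s : Nat × Nat) rb => (if mask &&& s.2 != 0 then s.1 ||| rb else s.1, s.2 <<< 1)) (0, 1)).1 := by
    unfold pvProj
    rw [List.map_congr_left (fun u hu => pv_rb U u hu 0)]
  rw [hprojv, show ((0 : Nat), (1 : Nat)) = ((0 : Nat), 1 <<< 0) by norm_num, pv_proj_testBit]
  simp [Nat.one_shiftLeft, Nat.testBit_two_pow]

theorem pv_idx_lt (U : List Int) (i : Nat) (h : i < U.length) :
    (PySem.Set.ofList U).idxOf (U[i]'h) < (PySem.Set.ofList U).length :=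
  List.idxOf_lt_length_of_mem ((PySem.Set.mem_ofList _ _).mpr (List.getElem_mem h))

theorem pv_proj_lt (U : List Int) (mask : Nat) :
    pvProj U mask < 2 ^ (PySem.Set.ofList U).length := by
  apply pv_lt_two_pow
  intro j hj
  obtain ⟨i, h, _, hidx⟩ := (pv_projbit U mask j).mp hj
  exact hidx ▸ pv_idx_lt U i h

theorem pv_entry_eq (family : List (List Int)) (U : List Int) (mask : Nat) :
    PySem.List.sorted (family.filter (fun edge => PySem.Set.issubset (PySem.Set.ofList edge)
        (PySem.Set.ofList (((List.range U.length).filter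
          (fun index => mask &&& (1 <<< index) != 0)).map
          (fun index : Nat => PySem.List.pyGetD U (index : Int) 0))))) (fun x => x) false
      = ((PySem.List.sorted (family.map (fun edge =>
            (edge, edge_mask_b edge (pvRep U) (1 <<< (PySem.Set.ofList U).length))))
          (fun p => p.1) false).filter
          (fun p => pvProj U mask &&& p.2 == p.2)).map (fun p => p.1) := by
  obtain ⟨hget, hsize⟩ := pvRep_spec U
  set D := PySem.Set.ofList U with hD
  set r := D.length with hr
  set survS := PySem.Set.ofList (((List.range U.length).filter
      (fun index => mask &&& (1 <<< index) != 0)).map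
      (fun index : Nat => PySem.List.pyGetD U (index : Int) 0)) with hsurvS
  have hrb : ∀ u ∈ U, ∀ dflt : Nat, PySem.Dict.getD (pvRep U) u dflt = 1 <<< D.idxOf u :=
    fun u hu dflt => pv_rb U u hu dflt
  have hprojbit : ∀ j, (pvProj U mask).testBit j = true ↔
      ∃ i, ∃ h : i < U.length, mask.testBit i = true ∧ D.idxOf (U[i]'h) = j :=
    fun j => pv_projbit U mask j
  have hidx_lt : ∀ i (h : i < U.length), D.idxOf (U[i]'h) < r :=
    fun i h => pv_idx_lt U i h
  have hsurv : ∀ v : Int, v ∈ survS ↔ ∃ i, ∃ h : i < U.length, mask.testBit i = true ∧ U[i]'h = v := by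
    intro v
    rw [hsurvS, PySem.Set.mem_ofList]
    constructor
    · intro hv
      obtain ⟨a, hamem, hav⟩ := List.mem_map.mp hv
      obtain ⟨har, hcond⟩ := List.mem_filter.mp hamem
      have ha : a < U.length := List.mem_range.mp har
      rw [pv_and_shift] at hcond
      refine ⟨a, ha, hcond, ?_⟩
      rw [← hav, PySem.List.pyGetD_natCast, List.getD_eq_getElem _ _ ha]
    · rintro ⟨i, hi, hbit, hv⟩
      apply List.mem_map.mpr
      refine ⟨i, List.mem_filter.mpr ⟨List.mem_range.mpr hi, by rw [pv_and_shift]; exact hbit⟩, ?_⟩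
      rw [PySem.List.pyGetD_natCast, List.getD_eq_getElem _ _ hi, hv]
  have hpt : ∀ v : Int,
      (∀ j, (PySem.Dict.getD (pvRep U) v (1 <<< r)).testBit j = true → (pvProj U mask).testBit j = true)
        ↔ ∃ i, ∃ h : i < U.length, mask.testBit i = true ∧ U[i]'h = v := by
    intro v
    by_cases hv : v ∈ U
    · have hvD : v ∈ D := (PySem.Set.mem_ofList U v).mpr hv
      rw [hrb v hv (1 <<< r)]
      constructor
      · intro h
        have hb := h (D.idxOf v) (by simp [Nat.one_shiftLeft, Nat.testBit_two_pow])
        obtain ⟨i, hi, hbit, hidx⟩ := (hprojbit _).mp hb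
        refine ⟨i, hi, hbit, ?_⟩
        have h1 : D[D.idxOf (U[i]'hi)]'(hidx_lt i hi) = U[i]'hi := List.getElem_idxOf (hidx_lt i hi)
        have h2 : D[D.idxOf v]'(List.idxOf_lt_length_of_mem hvD) = v :=
          List.getElem_idxOf (List.idxOf_lt_length_of_mem hvD)
        rw [← h2]
        rw [← h1]
        congr 1
      · rintro ⟨i, hi, hbit, rfl⟩
        intro j hj
        rw [Nat.one_shiftLeft, Nat.testBit_two_pow, decide_eq_true_eq] at hj
        exact (hprojbit j).mpr ⟨i, hi, hbit, hj⟩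
    · have himp : PySem.Dict.getD (pvRep U) v (1 <<< r) = 1 <<< r := by
        rw [PySem.Dict.getD_eq_get?_getD, hget v,
          if_neg (fun h => hv ((PySem.Set.mem_ofList U v).mp h))]
        rfl
      rw [himp]
      constructor
      · intro h
        have hb := h r (by simp [Nat.one_shiftLeft, Nat.testBit_two_pow])
        obtain ⟨i, hi, _, hidx⟩ := (hprojbit r).mp hb
        exact absurd hidx (Nat.ne_of_lt (hidx_lt i hi))
      · rintro ⟨i, hi, _, rfl⟩
        exact absurd (List.getElem_mem hi) hv
  have hem : ∀ (e : List Int) (j : Nat), (edge_mask_b e (pvRep U) (1 <<< r)).testBit j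
      = e.any (fun w => (PySem.Dict.getD (pvRep U) w (1 <<< r)).testBit j) := by
    intro e j
    unfold edge_mask_b
    rw [pv_foldl_or_testBit]
    simp
  have hcond : ∀ e : List Int,
      (pvProj U mask &&& edge_mask_b e (pvRep U) (1 <<< r) == edge_mask_b e (pvRep U) (1 <<< r))
        = PySem.Set.issubset (PySem.Set.ofList e) survS := by
    intro e
    rw [Bool.eq_iff_iff, pv_subset_iff, PySem.Set.issubset_iff]
    constructor
    · intro h v hv
      rw [PySem.Set.mem_ofList] at hv
      apply (hsurv v).mpr
      apply (hpt v).mp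
      intro j hj
      exact h j (by rw [hem]; exact List.any_eq_true.mpr ⟨v, hv, hj⟩)
    · intro h j hj
      rw [hem] at hj
      obtain ⟨v, hv, hvb⟩ := List.any_eq_true.mp hj
      exact (hpt v).mpr ((hsurv v).mp (h v ((PySem.Set.mem_ofList e v).mpr hv))) j hvb
  have hfc : (PySem.List.sorted (family.map (fun edge =>
        (edge, edge_mask_b edge (pvRep U) (1 <<< r)))) (fun p => p.1) false).filter
        (fun p => pvProj U mask &&& p.2 == p.2)
      = (PySem.List.sorted (family.map (fun edge =>
        (edge, edge_mask_b edge (pvRep U) (1 <<< r)))) (fun p => p.1) false).filter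
        (fun p => PySem.Set.issubset (PySem.Set.ofList p.1) survS) := by
    apply List.filter_congr
    intro p hp
    rw [PySem.List.mem_sorted] at hp
    obtain ⟨e, he, rfl⟩ := List.mem_map.mp hp
    exact hcond e
  rw [hfc]
  apply pv_sorted_id_bridge
  · have h1 := (PySem.List.sorted_perm (family.map (fun edge =>
        (edge, edge_mask_b edge (pvRep U) (1 <<< r)))) (fun p => p.1) false).filter
        (fun p => PySem.Set.issubset (PySem.Set.ofList p.1) survS)
    have h2 := h1.map (fun p : List Int × Nat => p.1)
    rw [List.filter_map] at h2
    simpa [Function.comp_def] using h2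
  · exact List.Pairwise.map _ (fun a b h => h)
      ((pv_prepped_pairwise _).filter _)

-- ===== VERDICT (by name: the statement is the Claim_ definition above) =====
theorem family_survival_signature_spec : Claim_equal_family_survival_signature := by
  intro family universe_ _dom
  unfold Spec_family_survival_signature
  show family_survival_signature family universe_ = family_survival_signature_alt family universe_
  simp only [family_survival_signature, family_survival_signature_alt]
  have hrepfold : universe_.foldl (fun rep u => if PySem.Dict.contains rep u then rep
      else PySem.Dict.insert rep u (1 <<< PySem.Dict.size rep)) PySem.Dict.empty
      = pvRep universe_ := rfl
  simp only [hrepfold, (pvRep_spec universe_).2]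
  apply List.map_congr_left
  intro mask _hmask
  have hlt : pvProj universe_ mask < 2 ^ (PySem.Set.ofList universe_).length :=
    pv_proj_lt universe_ mask
  rw [PySem.List.pyGetD_natCast,
    List.getD_eq_getElem _ _ (by simpa [pvProj] using hlt)]
  simp only [List.getElem_map, List.getElem_range]
  exact pv_entry_eq family universe_ mask
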